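-- pv_equiv track=rewrite | github.com/wangyendt/wayne_algorithm_lib | ndtpy/tools.py | find_all_non_negative_integer_solutions
-- ===== SOURCE A (Python) =====
-- def find_all_non_negative_integer_solutions(const_sum: int, num_vars: int):
--     """
--     求解所有满足x1+x2+...+x{num_vars}=const_sum的非负整数解
--
--     Author:   wangye
--     Datetime: 2019/4/16 17:49
--
--     :param const_sum:
--     :param num_vars:
--     :return:
--             所有非负整数解的list
--     """
--     if num_vars == 1:
--         solution_list = [[const_sum]]
--     else:
--         solution_list = []
--         for i in range(const_sum + 1):
--             result = find_all_non_negative_integer_solutions(const_sum - i, num_vars - 1)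
--             for res in result:
--                 tmp = [i]
--                 tmp.extend(res)
--                 solution_list.append(tmp)
--     return solution_list
-- ===== SOURCE B (Python) =====
-- from itertools import combinations
--
--
-- def find_all_non_negative_integer_solutions(const_sum: int, num_vars: int):
--     """Stars and bars: choose num_vars-1 divider positions among
--     const_sum + num_vars - 1 slots; the gaps between dividers are the parts.
--     combinations yields in lexicographic order, matching A's output order."""
--     if num_vars == 1:
--         return [[const_sum]]
--     n = const_sum + num_vars - 1
--     if num_vars > 1 and n < num_vars - 1:
--         # fewer slots than dividers (const_sum < 0): no solutions; also avoids
--         # asking combinations for an r > n, which allocates an r-sized buffer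
--         return []
--     solutions = []
--     for dividers in combinations(range(n), num_vars - 1):
--         parts = []
--         prev = -1
--         for p in dividers:
--             parts.append(p - prev - 1)
--             prev = p
--         parts.append(n - prev - 1)
--         solutions.append(parts)
--     return solutions
-- ===== Notes on version B (the rewrite author's own statement) =====
-- stated objective: idiomatic
-- what changed: Replaces the recursive enumeration (branch on the first variable, recurse on the rest) by the stars-and-bars construction: iterate itertools.combinations of divider positions and read each solution off as the gaps between dividers.
-- outside the precondition, e.g. on find_all_non_negative_integer_solutions(-1, 0): A returns [], B raises ValueError
import Mathlib
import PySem

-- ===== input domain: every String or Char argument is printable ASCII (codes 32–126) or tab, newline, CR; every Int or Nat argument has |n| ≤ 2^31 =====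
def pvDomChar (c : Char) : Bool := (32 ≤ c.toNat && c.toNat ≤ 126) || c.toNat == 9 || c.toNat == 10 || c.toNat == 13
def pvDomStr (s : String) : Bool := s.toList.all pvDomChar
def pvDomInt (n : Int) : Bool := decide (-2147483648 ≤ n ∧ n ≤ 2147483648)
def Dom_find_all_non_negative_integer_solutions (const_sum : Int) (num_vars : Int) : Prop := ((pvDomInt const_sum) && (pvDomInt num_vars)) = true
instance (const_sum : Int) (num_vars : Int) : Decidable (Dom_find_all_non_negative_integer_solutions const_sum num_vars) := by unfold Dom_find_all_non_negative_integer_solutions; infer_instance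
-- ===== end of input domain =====

-- B replaces A's recursion on the first variable by the stars-and-bars construction
-- (combinations of divider positions, read off as gaps); same output, idiomatic itertools style.


-- ===== PORT A =====
-- Literal port of A's recursion. The 'num_vars ≤ 0' guard only makes the function total:
-- there Python either diverges (const_sum ≥ 0: RecursionError) or returns [] — outside Pre_.
def find_all_non_negative_integer_solutions (const_sum : Int) (num_vars : Int) : List (List Int) :=
  if num_vars ≤ 0 then []
  else if num_vars = 1 then [[const_sum]]
  else
    (PySem.List.pyRange 0 (const_sum + 1) 1).foldl
      (fun solution_list i =>
        (find_all_non_negative_integer_solutions (const_sum - i) (num_vars - 1)).foldl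
          (fun sl res => sl ++ [i :: res]) solution_list)
      []
termination_by num_vars.toNat
decreasing_by omega

-- ===== PORT B =====
-- itertools.combinations(xs, r) in its lexicographic yield order
-- (the 'rest.length < r' test is itertools' own 'if r > n: return' pruning, kept so the
-- port, like the library, does no work on impossible suffixes)
def combosLex : List Int → Nat → List (List Int)
  | _, 0 => [[]]
  | [], _ + 1 => []
  | x :: rest, r + 1 =>
    if rest.length < r then []
    else ((combosLex rest r).map (fun cmb => x :: cmb)) ++ combosLex rest (r + 1)

-- the inner loop of B: parts from divider positions (prev starts at -1)
def gapsOf (n : Int) : List Int → Int → List Int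
  | [], prev => [n - prev - 1]
  | p :: ps, prev => (p - prev - 1) :: gapsOf n ps p

def find_all_non_negative_integer_solutions_alt (const_sum : Int) (num_vars : Int) : List (List Int) :=
  if num_vars = 1 then [[const_sum]]
  else if 1 < num_vars ∧ const_sum + num_vars - 1 < num_vars - 1 then []
  else
  (combosLex (PySem.List.pyRange 0 (const_sum + num_vars - 1) 1) (num_vars - 1).toNat).map
    (fun dividers => gapsOf (const_sum + num_vars - 1) dividers (-1))

-- ===== PRECONDITION & SPEC =====
-- Pre_ excludes num_vars ≤ 0: there A either hits RecursionError (const_sum ≥ 0) or returns an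
-- accidental [] (const_sum < 0), while B's combinations(..., num_vars-1) raises ValueError.
def Pre_find_all_non_negative_integer_solutions (const_sum : Int) (num_vars : Int) : Prop := 1 ≤ num_vars
instance (const_sum : Int) (num_vars : Int) : Decidable (Pre_find_all_non_negative_integer_solutions const_sum num_vars) := by unfold Pre_find_all_non_negative_integer_solutions; infer_instance
def pvWitness_find_all_non_negative_integer_solutions : Int × Int := (3, 2)

def Spec_find_all_non_negative_integer_solutions (const_sum : Int) (num_vars : Int) (out : List (List Int)) : Prop := out = find_all_non_negative_integer_solutions_alt const_sum num_vars
instance (const_sum : Int) (num_vars : Int) (out : List (List Int)) : Decidable (Spec_find_all_non_negative_integer_solutions const_sum num_vars out) := by unfold Spec_find_all_non_negative_integer_solutions; infer_instance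

-- ===== CLAIM (what is proved, stated in full; the proofs are below) =====
def Claim_equal_find_all_non_negative_integer_solutions : Prop := ∀ (const_sum : Int) (num_vars : Int), Dom_find_all_non_negative_integer_solutions const_sum num_vars → Pre_find_all_non_negative_integer_solutions const_sum num_vars → Spec_find_all_non_negative_integer_solutions const_sum num_vars (find_all_non_negative_integer_solutions const_sum num_vars)

-- ===== LEMMAS AND PROOFS =====

lemma combosLex_nil_of_length_lt : ∀ (xs : List Int) (r : Nat), xs.length < r → combosLex xs r = [] := by
  intro xs
  induction xs with
  | nil => intro r hr; cases r with
    | zero => omega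
    | succ r => simp [combosLex]
  | cons x rest ih =>
    intro r hr
    cases r with
    | zero => simp at hr
    | succ r =>
      rw [combosLex, if_pos (by simp at hr; omega)]

-- A's double loop in flatMap form (k ≥ 2 branch)
lemma A_flatMap (c k : Int) (hk : 2 ≤ k) :
    find_all_non_negative_integer_solutions c k =
      (PySem.List.pyRange 0 (c + 1) 1).flatMap
        (fun i => (find_all_non_negative_integer_solutions (c - i) (k - 1)).map (fun res => i :: res)) := by
  rw [find_all_non_negative_integer_solutions]
  rw [if_neg (by omega), if_neg (by omega)]
  have h1 : ∀ (sl : List (List Int)) (i : Int),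
      (find_all_non_negative_integer_solutions (c - i) (k - 1)).foldl (fun sl res => sl ++ [i :: res]) sl
        = sl ++ (find_all_non_negative_integer_solutions (c - i) (k - 1)).map (fun res => i :: res) := by
    intro sl i
    exact PySem.List.foldl_append_singleton_eq_map _ _ _
  calc (PySem.List.pyRange 0 (c + 1) 1).foldl
        (fun solution_list i =>
          (find_all_non_negative_integer_solutions (c - i) (k - 1)).foldl
            (fun sl res => sl ++ [i :: res]) solution_list) []
      = (PySem.List.pyRange 0 (c + 1) 1).foldl
        (fun solution_list i =>
          solution_list ++ (find_all_non_negative_integer_solutions (c - i) (k - 1)).map (fun res => i :: res)) [] := by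
        apply PySem.List.foldl_congr_mem
        intro sl i _
        exact h1 sl i
    _ = _ := by
        simpa using PySem.List.foldl_append_eq_flatMap _ _ []

-- main correspondence: combinations of range(base, base+c+m) with prev = base-1 enumerate A's solutions
lemma main_lemma : ∀ (m : Nat) (c base : Int),
    (combosLex (PySem.List.pyRange base (base + c + m) 1) m).map
        (fun ds => gapsOf (base + c + m) ds (base - 1))
      = find_all_non_negative_integer_solutions c (m + 1) := by
  intro m
  induction m with
  | zero =>
    intro c base
    rw [find_all_non_negative_integer_solutions]
    rw [if_neg (by omega), if_pos (by omega)]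
    simp [combosLex, gapsOf]
  | succ m ih =>
    have inner : ∀ (n : Nat) (base j : Int),
        (combosLex (PySem.List.pyRange base (base + n + (m + 1)) 1) (m + 1)).map
            (fun ds => gapsOf (base + n + (m + 1)) ds (base - 1 - j))
          = (PySem.List.pyRange j (j + n + 1) 1).flatMap
              (fun i => (find_all_non_negative_integer_solutions (j + n - i) (m + 1)).map (fun res => i :: res)) := by
      intro n
      induction n with
      | zero =>
        intro base j
        rw [PySem.List.pyRange_one_cons (by push_cast; omega)]
        rw [combosLex,
          if_neg (by rw [PySem.List.length_pyRange_one]; push_cast; omega)]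
        rw [combosLex_nil_of_length_lt _ (m + 1)
          (by rw [PySem.List.length_pyRange_one]; push_cast; omega)]
        have := ih (0 : Int) (base + 1)
        rw [show ((base:Int)+1) + 0 + (m:Int) = base + (0:Nat) + ((m:Int)+1) from by push_cast; omega] at this
        rw [show ((base:Int)+1-1) = base from by omega] at this
        rw [List.append_nil, List.map_map]
        have hsing : PySem.List.pyRange j (j + (0:Nat) + 1) 1 = [j] := by
          push_cast
          simpa using PySem.List.pyRange_one_singleton j
        rw [hsing]
        simp only [List.flatMap_cons, List.flatMap_nil, List.append_nil]
        rw [show (j + (0:Nat) - j) = (0:Int) from by push_cast; omega]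
        rw [← this, List.map_map]
        apply List.map_congr_left
        intro ds _
        simp only [Function.comp]
        rw [gapsOf]
        congr 1
        omega
      | succ n ihn =>
        intro base j
        push_cast
        rw [PySem.List.pyRange_one_cons (show (base:Int) < base + ((n:Int)+1) + ((m:Int)+1) by omega)]
        rw [combosLex,
          if_neg (by rw [PySem.List.length_pyRange_one]; push_cast; omega)]
        rw [List.map_append, List.map_map]
        -- chunk 1 = (A (n+1) (m+1)).map (j :: ·)
        have h1 : ((combosLex (PySem.List.pyRange (base + 1) (base + ((n:Int)+1) + ((m:Int) + 1)) 1) m).map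
              ((fun ds => gapsOf (base + ((n:Int)+1) + ((m:Int) + 1)) ds (base - 1 - j)) ∘ (fun cmb => base :: cmb)))
            = (find_all_non_negative_integer_solutions ((n:Int)+1) (m + 1)).map (fun res => j :: res) := by
          have := ih ((n:Int)+1) (base + 1)
          rw [show ((base:Int)+1) + ((n:Int)+1) + (m:Int) = base + ((n:Int)+1) + ((m:Int)+1) from by omega] at this
          rw [show ((base:Int)+1-1) = base from by omega] at this
          rw [← this, List.map_map]
          apply List.map_congr_left
          intro ds _
          simp only [Function.comp]
          rw [gapsOf]
          congr 1
          omega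
        -- chunk 2 by inner IH at (base+1, j+1)
        have h2 : (combosLex (PySem.List.pyRange (base + 1) (base + ((n:Int)+1) + ((m:Int) + 1)) 1) (m + 1)).map
              (fun ds => gapsOf (base + ((n:Int)+1) + ((m:Int) + 1)) ds (base - 1 - j))
            = (PySem.List.pyRange (j + 1) (j + ((n:Int)+1) + 1) 1).flatMap
                (fun i => (find_all_non_negative_integer_solutions (j + ((n:Int)+1) - i) (m + 1)).map (fun res => i :: res)) := by
          have := ihn (base + 1) (j + 1)
          rw [show ((base:Int)+1) + (n:Int) + ((m:Int)+1) = base + ((n:Int)+1) + ((m:Int)+1) from by omega] at this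
          rw [show ((base:Int)+1-1-(j+1)) = base - 1 - j from by omega] at this
          rw [show ((j:Int)+1) + (n:Int) + 1 = j + ((n:Int)+1) + 1 from by omega] at this
          rw [this]
          apply List.flatMap_congr
          intro i _
          congr 2
          omega
        rw [h1, h2]
        rw [PySem.List.pyRange_one_cons (show (j:Int) < j + ((n:Int)+1) + 1 by omega)]
        rw [List.flatMap_cons]
        rw [show (j + ((n:Int)+1) - j) = (n:Int)+1 from by ring]
    intro c base
    by_cases hc : c < 0
    · rw [combosLex_nil_of_length_lt _ (m+1)
        (by rw [PySem.List.length_pyRange_one]; push_cast; omega)]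
      rw [A_flatMap c (↑(m+1)+1) (by push_cast; omega)]
      rw [PySem.List.pyRange_one_eq_nil (by omega)]
      simp
    · rw [not_lt] at hc
      obtain ⟨nn, hnn⟩ : ∃ nn : Nat, c = (nn : Int) := ⟨c.toNat, (Int.toNat_of_nonneg hc).symm⟩
      subst hnn
      have hin := inner nn base 0
      rw [show ((base:Int) - 1 - 0) = base - 1 from by ring] at hin
      push_cast
      rw [hin]
      rw [A_flatMap (nn:Int) ((m:Int)+1+1) (by omega)]
      rw [show ((0:Int) + (nn:Int) + 1) = (nn:Int) + 1 from by ring]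
      apply List.flatMap_congr
      intro i _
      congr 2
      · omega
      · ring

-- ===== VERDICT (by name: the statement is the Claim_ definition above) =====
theorem find_all_non_negative_integer_solutions_spec : Claim_equal_find_all_non_negative_integer_solutions := by
  intro c k _ hpre
  have hk : 1 ≤ k := hpre
  unfold Spec_find_all_non_negative_integer_solutions
  unfold find_all_non_negative_integer_solutions_alt
  split_ifs with h1 hg
  · subst h1
    rw [find_all_non_negative_integer_solutions]
    rw [if_neg (by omega), if_pos rfl]
  · rw [A_flatMap c k (by omega), PySem.List.pyRange_one_eq_nil (by omega)]
    simp
  have h := main_lemma (k-1).toNat c 0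
  rw [show ((0:Int) + c + ((k-1).toNat : Int)) = c + k - 1 from by omega] at h
  rw [show ((0:Int) - 1) = -1 from by ring] at h
  rw [show ((((k-1).toNat : Int)) + 1) = k from by omega] at h
  exact h.symm
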